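-- pv_equiv track=rewrite | github.com/HBNetwork/coding-dojo | decompondo-numeros-21_max-digitos.py | decomposing_numbers2
-- ===== SOURCE A (Python) =====
-- def decomposing_numbers2(n):
--     if n <= 5:
--         return ['0000']
--
--     values = []
--
--     for value in range(0, 10000):
--         value_as_str = str(value).zfill(4)
--         fir = int(value_as_str[0])
--         sec = int(value_as_str[1])
--         thi = int(value_as_str[2])
--         fou = int(value_as_str[3])
--         if fir + sec + thi + fou == 21 and (fir <= n and sec <= n and thi <= n
--                                             and fou <= n):
--             if n in [fir, sec, thi, fou]:
--                 if fir <= sec and sec <= thi and thi <= fou: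
--                     values.append(str(str(fir) + str(sec) + str(thi) + str(fou)))
--     return values
-- ===== SOURCE B (Python) =====
-- def decomposing_numbers2(n):
--     if n <= 5:
--         return ['0000']
--     top = min(9, n)
--     values = []
--     for a in range(0, top + 1):
--         for b in range(a, top + 1):
--             for c in range(b, top + 1):
--                 for d in range(c, top + 1):
--                     if a + b + c + d == 21 and n in (a, b, c, d):
--                         values.append(str(a) + str(b) + str(c) + str(d))
--     return values
-- ===== Notes on version B (the rewrite author's own statement) =====
-- stated objective: idiomatic
-- what changed: Instead of scanning all 10000 numbers, stringifying, zero-padding and re-parsing each one's digits and testing sortedness, B enumerates the non-decreasing digit quadruples directly with four nested loops over digits 0..min(9,n) and emits each matching quadruple, producing the same list in the same order.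
import Mathlib
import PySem

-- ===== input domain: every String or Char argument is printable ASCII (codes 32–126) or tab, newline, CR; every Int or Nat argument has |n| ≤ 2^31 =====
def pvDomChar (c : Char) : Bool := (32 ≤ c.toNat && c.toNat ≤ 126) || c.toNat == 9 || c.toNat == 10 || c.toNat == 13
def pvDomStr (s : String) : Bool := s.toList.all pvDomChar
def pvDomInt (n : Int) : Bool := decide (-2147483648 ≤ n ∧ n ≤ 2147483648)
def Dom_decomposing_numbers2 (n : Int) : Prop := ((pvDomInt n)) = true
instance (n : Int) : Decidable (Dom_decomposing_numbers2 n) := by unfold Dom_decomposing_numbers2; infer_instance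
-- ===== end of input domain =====

-- B replaces A's scan of all 10000 numbers (stringify, left-pad, re-parse digits, test sortedness)
-- by directly enumerating the non-decreasing digit quadruples with four nested loops (idiomatic).

-- ===== PORT A =====
-- Loop body of A's for-loop, transliterated step for step.
-- str(value).zfill(4) is ported by hand: left-pad with '0' to length 4 (value is
-- nonnegative here, so no sign handling); this is exact for the values reached.
-- int(value_as_str[k]) never raises here (the string has 4 digit characters), so
-- pyGetD / Option.getD only make the same computation total.
def pvBodyA (n : Int) (values : List String) (value : Int) : List String :=
  let s := PySem.Int.toChars value
  let value_as_str := List.replicate (4 - s.length) '0' ++ s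
  let fir := (PySem.Int.ofChars? [PySem.List.pyGetD value_as_str 0 '0']).getD 0
  let sec := (PySem.Int.ofChars? [PySem.List.pyGetD value_as_str 1 '0']).getD 0
  let thi := (PySem.Int.ofChars? [PySem.List.pyGetD value_as_str 2 '0']).getD 0
  let fou := (PySem.Int.ofChars? [PySem.List.pyGetD value_as_str 3 '0']).getD 0
  if fir + sec + thi + fou == 21 && (decide (fir ≤ n) && decide (sec ≤ n) && decide (thi ≤ n) && decide (fou ≤ n)) then
    if [fir, sec, thi, fou].contains n then
      if decide (fir ≤ sec) && decide (sec ≤ thi) && decide (thi ≤ fou) then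
        -- str(str(fir) + str(sec) + str(thi) + str(fou)): str() of a str is the identity
        values ++ [PySem.Int.toStr fir ++ PySem.Int.toStr sec ++ PySem.Int.toStr thi ++ PySem.Int.toStr fou]
      else values
    else values
  else values

def decomposing_numbers2 (n : Int) : List String :=
  if n ≤ 5 then ["0000"]
  else (PySem.List.pyRange 0 10000 1).foldl (pvBodyA n) []

-- ===== PORT B =====
def decomposing_numbers2_alt (n : Int) : List String :=
  if n ≤ 5 then ["0000"]
  else
    let top := min 9 n
    (PySem.List.pyRange 0 (top + 1) 1).foldl (fun values a =>
      (PySem.List.pyRange a (top + 1) 1).foldl (fun values b =>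
        (PySem.List.pyRange b (top + 1) 1).foldl (fun values c =>
          (PySem.List.pyRange c (top + 1) 1).foldl (fun values d =>
            if a + b + c + d == 21 && [a, b, c, d].contains n then
              values ++ [PySem.Int.toStr a ++ PySem.Int.toStr b ++ PySem.Int.toStr c ++ PySem.Int.toStr d]
            else values) values) values) values) []

-- ===== PRECONDITION & SPEC =====
def Spec_decomposing_numbers2 (n : Int) (out : List String) : Prop := out = decomposing_numbers2_alt n
instance (n : Int) (out : List String) : Decidable (Spec_decomposing_numbers2 n out) := by unfold Spec_decomposing_numbers2; infer_instance

-- ===== CLAIM (what is proved, stated in full; the proofs are below) =====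
def Claim_equal_decomposing_numbers2 : Prop := ∀ (n : Int), Dom_decomposing_numbers2 n → Spec_decomposing_numbers2 n (decomposing_numbers2 n)

-- ===== LEMMAS AND PROOFS =====

-- The digit string of a 4-tuple and the two filter predicates, as named abbreviations.
def pvS4 (a b c d : Int) : String :=
  PySem.Int.toStr a ++ PySem.Int.toStr b ++ PySem.Int.toStr c ++ PySem.Int.toStr d

def pvPA (n a b c d : Int) : Bool :=
  (a + b + c + d == 21 && (decide (a ≤ n) && decide (b ≤ n) && decide (c ≤ n) && decide (d ≤ n))) &&
    ([a, b, c, d].contains n && (decide (a ≤ b) && decide (b ≤ c) && decide (c ≤ d)))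

def pvPB (n a b c d : Int) : Bool :=
  a + b + c + d == 21 && [a, b, c, d].contains n

-- Decimal digit characters of a natural number (most significant first).
def pvDigits (m : Nat) : List Char :=
  if m < 10 then [Nat.digitChar m]
  else pvDigits (m / 10) ++ [Nat.digitChar (m % 10)]
decreasing_by omega

theorem pv_tdc (f : Nat) : ∀ (m : Nat) (l : List Char), m < f →
    Nat.toDigitsCore 10 f m l = pvDigits m ++ l := by
  induction f with
  | zero => intro m l h; omega
  | succ f ih =>
    intro m l h
    by_cases h10 : m < 10
    · have hm0 : m / 10 = 0 := by omega
      have hmm : m % 10 = m := by omega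
      simp only [Nat.toDigitsCore]
      rw [if_pos hm0, hmm]
      rw [pvDigits, if_pos h10]
      simp
    · have hne : m / 10 ≠ 0 := by omega
      simp only [Nat.toDigitsCore]
      rw [if_neg hne, ih (m / 10) _ (by omega)]
      conv_rhs => rw [pvDigits, if_neg h10]
      simp

theorem pv_toChars (m : Nat) : PySem.Int.toChars (m : Int) = pvDigits m := by
  have h0 : ¬ ((m : Int) < 0) := by omega
  simp only [PySem.Int.toChars, if_neg h0, Int.toNat_natCast, Nat.toDigits]
  rw [pv_tdc (m + 1) m [] (by omega)]
  simp

theorem pv_zfill (m : Nat) (h : m < 10000) :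
    List.replicate (4 - (pvDigits m).length) '0' ++ pvDigits m
      = [Nat.digitChar (m / 1000), Nat.digitChar (m / 100 % 10),
         Nat.digitChar (m / 10 % 10), Nat.digitChar (m % 10)] := by
  have d0 : Nat.digitChar 0 = '0' := rfl
  by_cases h1 : m < 10
  · have u : pvDigits m = [Nat.digitChar m] := by rw [pvDigits, if_pos h1]
    have e1 : m / 1000 = 0 := by omega
    have e2 : m / 100 % 10 = 0 := by omega
    have e3 : m / 10 % 10 = 0 := by omega
    have e4 : m % 10 = m := by omega
    rw [u, e1, e2, e3, e4, d0]
    rfl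
  · by_cases h2 : m < 100
    · have u1 : pvDigits m = pvDigits (m / 10) ++ [Nat.digitChar (m % 10)] := by
        rw [pvDigits, if_neg h1]
      have u2 : pvDigits (m / 10) = [Nat.digitChar (m / 10)] := by
        rw [pvDigits, if_pos (by omega)]
      have e1 : m / 1000 = 0 := by omega
      have e2 : m / 100 % 10 = 0 := by omega
      have e3 : m / 10 % 10 = m / 10 := by omega
      rw [u1, u2, e1, e2, e3, d0]
      rfl
    · by_cases h3 : m < 1000
      · have u1 : pvDigits m = pvDigits (m / 10) ++ [Nat.digitChar (m % 10)] := by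
          rw [pvDigits, if_neg h1]
        have u2 : pvDigits (m / 10) = pvDigits (m / 10 / 10) ++ [Nat.digitChar (m / 10 % 10)] := by
          rw [pvDigits, if_neg (by omega)]
        have u3 : m / 10 / 10 = m / 100 := by omega
        have u4 : pvDigits (m / 100) = [Nat.digitChar (m / 100)] := by
          rw [pvDigits, if_pos (by omega)]
        have e1 : m / 1000 = 0 := by omega
        have e2 : m / 100 % 10 = m / 100 := by omega
        rw [u1, u2, u3, u4, e1, e2, d0]
        rfl
      · have u1 : pvDigits m = pvDigits (m / 10) ++ [Nat.digitChar (m % 10)] := by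
          rw [pvDigits, if_neg h1]
        have u2 : pvDigits (m / 10) = pvDigits (m / 10 / 10) ++ [Nat.digitChar (m / 10 % 10)] := by
          rw [pvDigits, if_neg (by omega)]
        have u3 : m / 10 / 10 = m / 100 := by omega
        have u4 : pvDigits (m / 100) = pvDigits (m / 100 / 10) ++ [Nat.digitChar (m / 100 % 10)] := by
          rw [pvDigits, if_neg (by omega)]
        have u5 : m / 100 / 10 = m / 1000 := by omega
        have u6 : pvDigits (m / 1000) = [Nat.digitChar (m / 1000)] := by
          rw [pvDigits, if_pos (by omega)]
        rw [u1, u2, u3, u4, u5, u6]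
        rfl

theorem pv_parse (d : Nat) (h : d < 10) :
    PySem.Int.ofChars? [Nat.digitChar d] = some (d : Int) := by
  interval_cases d <;> decide

theorem pv_if3 {α : Type} (c1 c2 c3 : Bool) (x y : α) :
    (if c1 then (if c2 then (if c3 then x else y) else y) else y)
      = (if c1 && (c2 && c3) then x else y) := by
  cases c1 <;> cases c2 <;> cases c3 <;> simp

theorem pv_body_step (n : Int) (acc : List String) (m : Nat) (h : m < 10000) :
    pvBodyA n acc (m : Int)
      = (if pvPA n ((m / 1000 : Nat) : Int) ((m / 100 % 10 : Nat) : Int)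
              ((m / 10 % 10 : Nat) : Int) ((m % 10 : Nat) : Int)
         then acc ++ [pvS4 ((m / 1000 : Nat) : Int) ((m / 100 % 10 : Nat) : Int)
              ((m / 10 % 10 : Nat) : Int) ((m % 10 : Nat) : Int)]
         else acc) := by
  have g0 : PySem.List.pyGetD [Nat.digitChar (m / 1000), Nat.digitChar (m / 100 % 10),
      Nat.digitChar (m / 10 % 10), Nat.digitChar (m % 10)] 0 '0' = Nat.digitChar (m / 1000) := by
    rw [PySem.List.pyGetD_eq_getElem _ _ (by norm_num) (by norm_num)]
    rfl
  have g1 : PySem.List.pyGetD [Nat.digitChar (m / 1000), Nat.digitChar (m / 100 % 10),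
      Nat.digitChar (m / 10 % 10), Nat.digitChar (m % 10)] 1 '0' = Nat.digitChar (m / 100 % 10) := by
    rw [PySem.List.pyGetD_eq_getElem _ _ (by norm_num) (by norm_num)]
    rfl
  have g2 : PySem.List.pyGetD [Nat.digitChar (m / 1000), Nat.digitChar (m / 100 % 10),
      Nat.digitChar (m / 10 % 10), Nat.digitChar (m % 10)] 2 '0' = Nat.digitChar (m / 10 % 10) := by
    rw [PySem.List.pyGetD_eq_getElem _ _ (by norm_num) (by norm_num)]
    rfl
  have g3 : PySem.List.pyGetD [Nat.digitChar (m / 1000), Nat.digitChar (m / 100 % 10),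
      Nat.digitChar (m / 10 % 10), Nat.digitChar (m % 10)] 3 '0' = Nat.digitChar (m % 10) := by
    rw [PySem.List.pyGetD_eq_getElem _ _ (by norm_num) (by norm_num)]
    rfl
  simp only [pvBodyA, pv_toChars]
  rw [pv_zfill m h, g0, g1, g2, g3,
      pv_parse _ (by omega : m / 1000 < 10), pv_parse _ (by omega : m / 100 % 10 < 10),
      pv_parse _ (by omega : m / 10 % 10 < 10), pv_parse _ (by omega : m % 10 < 10)]
  simp only [Option.getD_some]
  rw [pv_if3]
  rfl

theorem pv_fmCongr {α β : Type} (l : List α) (f g : α → List β)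
    (h : ∀ x ∈ l, f x = g x) : l.flatMap f = l.flatMap g := by
  induction l with
  | nil => rfl
  | cons x xs ih =>
    simp only [List.flatMap_cons, h x (by simp)]
    rw [ih (fun y hy => h y (by simp [hy]))]

theorem pv_filter_map_flatMap {α β : Type} (l : List α) (p : α → Bool) (f : α → β) :
    (l.filter p).map f = l.flatMap (fun x => if p x then [f x] else []) := by
  induction l with
  | nil => rfl
  | cons x xs ih => by_cases hx : p x <;> simp [hx, ih]

theorem pv_range_mul (m k : Nat) :
    List.range (m * k) = (List.range m).flatMap (fun t => (List.range k).map (fun j => k * t + j)) := by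
  induction m with
  | zero => simp
  | succ m ih =>
    rw [show (m + 1) * k = m * k + k from by ring, List.range_add, List.range_succ,
        List.flatMap_append, ← ih]
    simp [Nat.mul_comm]

theorem pv_r10000 : List.range 10000
    = (List.range 10).flatMap (fun t => (List.range 1000).map (fun j => 1000 * t + j)) := by
  rw [show (10000 : Nat) = 10 * 1000 from by norm_num, pv_range_mul]

theorem pv_r1000 : List.range 1000
    = (List.range 10).flatMap (fun t => (List.range 100).map (fun j => 100 * t + j)) := by
  rw [show (1000 : Nat) = 10 * 100 from by norm_num, pv_range_mul]

theorem pv_r100 : List.range 100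
    = (List.range 10).flatMap (fun t => (List.range 10).map (fun j => 10 * t + j)) := by
  rw [show (100 : Nat) = 10 * 10 from by norm_num, pv_range_mul]

theorem pv_quad_cast (H : Int → Int → Int → Int → List String) :
    (List.range 10).flatMap (fun (a : Nat) => (List.range 10).flatMap (fun (b : Nat) =>
      (List.range 10).flatMap (fun (c : Nat) => (List.range 10).flatMap (fun (d : Nat) =>
        H (a : Int) (b : Int) (c : Int) (d : Int)))))
      = (PySem.List.pyRange 0 10 1).flatMap (fun a => (PySem.List.pyRange 0 10 1).flatMap (fun b =>
          (PySem.List.pyRange 0 10 1).flatMap (fun c => (PySem.List.pyRange 0 10 1).flatMap (fun d => H a b c d)))) := by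
  have e : PySem.List.pyRange 0 10 1 = (List.range 10).map (fun (k : Nat) => (k : Int)) := by
    rw [PySem.List.pyRange_one 0 10, show ((10 : Int) - 0).toNat = 10 from rfl]
    exact List.map_congr_left (fun k _ => zero_add _)
  simp only [e, List.flatMap_map]

set_option maxHeartbeats 1000000 in
theorem pv_A_nf (n : Int) (h : ¬ n ≤ 5) :
    decomposing_numbers2 n
      = (PySem.List.pyRange 0 10 1).flatMap (fun a => (PySem.List.pyRange 0 10 1).flatMap (fun b =>
          (PySem.List.pyRange 0 10 1).flatMap (fun c => (PySem.List.pyRange 0 10 1).flatMap (fun d =>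
            if pvPA n a b c d then [pvS4 a b c d] else [])))) := by
  simp only [decomposing_numbers2]
  rw [if_neg h, PySem.List.pyRange_one 0 10000,
      show ((10000 : Int) - 0).toNat = 10000 from rfl, List.foldl_map]
  refine Eq.trans (PySem.List.foldl_congr_mem (List.range 10000) _
    (fun acc (k : Nat) =>
      if pvPA n ((k / 1000 : Nat) : Int) ((k / 100 % 10 : Nat) : Int)
          ((k / 10 % 10 : Nat) : Int) ((k % 10 : Nat) : Int)
      then acc ++ [pvS4 ((k / 1000 : Nat) : Int) ((k / 100 % 10 : Nat) : Int)
          ((k / 10 % 10 : Nat) : Int) ((k % 10 : Nat) : Int)]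
      else acc) [] ?_) ?_
  · intro acc x hx
    show pvBodyA n acc (0 + (x : Int)) = _
    rw [zero_add]
    exact pv_body_step n acc x (List.mem_range.mp hx)
  rw [PySem.List.foldl_append_if, List.nil_append, pv_filter_map_flatMap, pv_r10000]
  simp only [List.flatMap_assoc, List.flatMap_map, pv_r1000, pv_r100]
  refine Eq.trans (pv_fmCongr _ _ _ ?_)
    (pv_quad_cast (fun a b c d => if pvPA n a b c d then [pvS4 a b c d] else []))
  intro a ha
  refine pv_fmCongr _ _ _ ?_
  intro b hb
  refine pv_fmCongr _ _ _ ?_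
  intro c hc
  refine pv_fmCongr _ _ _ ?_
  intro d hd
  dsimp only
  have ha' := List.mem_range.mp ha
  have hb' := List.mem_range.mp hb
  have hc' := List.mem_range.mp hc
  have hd' := List.mem_range.mp hd
  have E1 : (1000 * a + (100 * b + (10 * c + d))) / 1000 = a := by omega
  have E2 : (1000 * a + (100 * b + (10 * c + d))) / 100 % 10 = b := by omega
  have E3 : (1000 * a + (100 * b + (10 * c + d))) / 10 % 10 = c := by omega
  have E4 : (1000 * a + (100 * b + (10 * c + d))) % 10 = d := by omega
  rw [E1, E2, E3, E4]

theorem pv_B_nf (n : Int) (h : ¬ n ≤ 5) :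
    decomposing_numbers2_alt n
      = (PySem.List.pyRange 0 (min 9 n + 1) 1).flatMap (fun a =>
          (PySem.List.pyRange a (min 9 n + 1) 1).flatMap (fun b =>
            (PySem.List.pyRange b (min 9 n + 1) 1).flatMap (fun c =>
              (PySem.List.pyRange c (min 9 n + 1) 1).flatMap (fun d =>
                if pvPB n a b c d then [pvS4 a b c d] else [])))) := by
  simp only [decomposing_numbers2_alt]
  rw [if_neg h]
  simp only [PySem.List.foldl_append_if, PySem.List.foldl_append_eq_flatMap,
    List.nil_append, pv_filter_map_flatMap]
  rfl

theorem pv_level (lo hi : Int) (f : Int → List String) (h0 : 0 ≤ lo) (hhi : hi ≤ 10)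
    (hlh : lo ≤ hi)
    (hf : ∀ x : Int, 0 ≤ x → x < 10 → ¬ (lo ≤ x ∧ x < hi) → f x = []) :
    (PySem.List.pyRange 0 10 1).flatMap f = (PySem.List.pyRange lo hi 1).flatMap f := by
  rw [PySem.List.pyRange_one_append 0 lo 10 h0 (le_trans hlh hhi),
      PySem.List.pyRange_one_append lo hi 10 hlh hhi, List.flatMap_append, List.flatMap_append]
  have e1 : (PySem.List.pyRange 0 lo 1).flatMap f = [] := by
    rw [List.flatMap_eq_nil_iff]
    intro x hx
    rw [PySem.List.mem_pyRange_one] at hx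
    exact hf x hx.1 (by omega) (by omega)
  have e2 : (PySem.List.pyRange hi 10 1).flatMap f = [] := by
    rw [List.flatMap_eq_nil_iff]
    intro x hx
    rw [PySem.List.mem_pyRange_one] at hx
    exact hf x (by omega) hx.2 (by omega)
  rw [e1, e2]
  simp

theorem pv_pA_props {n a b c d : Int} (hc : pvPA n a b c d = true) :
    a ≤ n ∧ b ≤ n ∧ c ≤ n ∧ d ≤ n ∧ a ≤ b ∧ b ≤ c ∧ c ≤ d := by
  simp only [pvPA, Bool.and_eq_true, decide_eq_true_eq] at hc
  tauto

theorem pv_pA_eq_pB {n a b c d : Int} (h1 : a ≤ n) (h2 : b ≤ n) (h3 : c ≤ n) (h4 : d ≤ n)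
    (h5 : a ≤ b) (h6 : b ≤ c) (h7 : c ≤ d) : pvPA n a b c d = pvPB n a b c d := by
  simp only [pvPA, pvPB, decide_eq_true h1, decide_eq_true h2, decide_eq_true h3,
    decide_eq_true h4, decide_eq_true h5, decide_eq_true h6, decide_eq_true h7,
    Bool.and_true]

theorem pv_Ld (n a b c : Int) (ha : 0 ≤ a) (hab : a ≤ b) (hbc : b ≤ c) (hct : c ≤ min 9 n) :
    (PySem.List.pyRange 0 10 1).flatMap (fun d => if pvPA n a b c d then [pvS4 a b c d] else [])
      = (PySem.List.pyRange c (min 9 n + 1) 1).flatMap (fun d => if pvPB n a b c d then [pvS4 a b c d] else []) := by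
  rw [pv_level c (min 9 n + 1) _ (by omega) (by omega) (by omega) ?hf]
  · apply pv_fmCongr
    intro d hd
    rw [PySem.List.mem_pyRange_one] at hd
    rw [pv_pA_eq_pB (by omega) (by omega) (by omega) (by omega) (by omega) (by omega) (by omega)]
  case hf =>
    intro x hx0 hx10 hnot
    rw [if_neg]
    intro hcon
    have hp := pv_pA_props hcon
    omega

theorem pv_Lc (n a b : Int) (ha : 0 ≤ a) (hab : a ≤ b) (hbt : b ≤ min 9 n) :
    (PySem.List.pyRange 0 10 1).flatMap (fun c => (PySem.List.pyRange 0 10 1).flatMap (fun d =>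
        if pvPA n a b c d then [pvS4 a b c d] else []))
      = (PySem.List.pyRange b (min 9 n + 1) 1).flatMap (fun c =>
          (PySem.List.pyRange c (min 9 n + 1) 1).flatMap (fun d =>
            if pvPB n a b c d then [pvS4 a b c d] else [])) := by
  rw [pv_level b (min 9 n + 1) _ (by omega) (by omega) (by omega) ?hf]
  · apply pv_fmCongr
    intro c hc
    rw [PySem.List.mem_pyRange_one] at hc
    exact pv_Ld n a b c ha hab hc.1 (by omega)
  case hf =>
    intro x hx0 hx10 hnot
    rw [List.flatMap_eq_nil_iff]
    intro d _
    rw [if_neg]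
    intro hcon
    have hp := pv_pA_props hcon
    omega

theorem pv_Lb (n a : Int) (ha : 0 ≤ a) (hat : a ≤ min 9 n) :
    (PySem.List.pyRange 0 10 1).flatMap (fun b => (PySem.List.pyRange 0 10 1).flatMap (fun c =>
        (PySem.List.pyRange 0 10 1).flatMap (fun d => if pvPA n a b c d then [pvS4 a b c d] else [])))
      = (PySem.List.pyRange a (min 9 n + 1) 1).flatMap (fun b =>
          (PySem.List.pyRange b (min 9 n + 1) 1).flatMap (fun c =>
            (PySem.List.pyRange c (min 9 n + 1) 1).flatMap (fun d =>
              if pvPB n a b c d then [pvS4 a b c d] else []))) := by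
  rw [pv_level a (min 9 n + 1) _ (by omega) (by omega) (by omega) ?hf]
  · apply pv_fmCongr
    intro b hb
    rw [PySem.List.mem_pyRange_one] at hb
    exact pv_Lc n a b ha hb.1 (by omega)
  case hf =>
    intro x hx0 hx10 hnot
    rw [List.flatMap_eq_nil_iff]
    intro c _
    rw [List.flatMap_eq_nil_iff]
    intro d _
    rw [if_neg]
    intro hcon
    have hp := pv_pA_props hcon
    omega

theorem pv_La (n : Int) (h : ¬ n ≤ 5) :
    (PySem.List.pyRange 0 10 1).flatMap (fun a => (PySem.List.pyRange 0 10 1).flatMap (fun b =>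
        (PySem.List.pyRange 0 10 1).flatMap (fun c => (PySem.List.pyRange 0 10 1).flatMap (fun d =>
          if pvPA n a b c d then [pvS4 a b c d] else []))))
      = (PySem.List.pyRange 0 (min 9 n + 1) 1).flatMap (fun a =>
          (PySem.List.pyRange a (min 9 n + 1) 1).flatMap (fun b =>
            (PySem.List.pyRange b (min 9 n + 1) 1).flatMap (fun c =>
              (PySem.List.pyRange c (min 9 n + 1) 1).flatMap (fun d =>
                if pvPB n a b c d then [pvS4 a b c d] else [])))) := by
  rw [pv_level 0 (min 9 n + 1) _ le_rfl (by omega) (by omega) ?hf]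
  · apply pv_fmCongr
    intro a ha
    rw [PySem.List.mem_pyRange_one] at ha
    exact pv_Lb n a ha.1 (by omega)
  case hf =>
    intro x hx0 hx10 hnot
    rw [List.flatMap_eq_nil_iff]
    intro b _
    rw [List.flatMap_eq_nil_iff]
    intro c _
    rw [List.flatMap_eq_nil_iff]
    intro d _
    rw [if_neg]
    intro hcon
    have hp := pv_pA_props hcon
    omega

-- ===== VERDICT (by name: the statement is the Claim_ definition above) =====
theorem decomposing_numbers2_spec : Claim_equal_decomposing_numbers2 := by
  intro n _hdom
  unfold Spec_decomposing_numbers2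
  by_cases h : n ≤ 5
  · simp [decomposing_numbers2, decomposing_numbers2_alt, if_pos h]
  · rw [pv_A_nf n h, pv_La n h, pv_B_nf n h]
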